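-- pv_equiv track=rewrite | github.com/sauz-zeth/vbox-home | py/ege25.176v5.py | divs
-- ===== SOURCE A (Python) =====
-- def divs(x):
--     j = 2
--     d = []
--     d1 = []
--
--     while j * j < x:
--         if x % j == 0:
--             d.append(j)
--             d1.append(x // j)
--
--         j += 1
--
--     if j * j == x:
--         d.append(j)
--
--     d += reversed(d1)
--
--     return d
-- ===== SOURCE B (Python) =====
-- def divs(x):
--     if x < 2:
--         return []
--     # factor x into prime powers by trial division with division-out
--     n = x
--     fac = []
--     p = 2
--     while p * p <= n:
--         if n % p == 0:
--             e = 0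
--             while n % p == 0:
--                 n //= p
--                 e += 1
--             fac.append((p, e))
--         p += 1
--     if n > 1:
--         fac.append((n, 1))
--     # generate every divisor as a product of prime powers
--     ds = [1]
--     for (p, e) in fac:
--         ds = [d * p ** k for d in ds for k in range(e + 1)]
--     ds.sort()
--     # drop the two trivial divisors
--     return [d for d in ds if d != 1 and d != x]
-- ===== Notes on version B (the rewrite author's own statement) =====
-- stated objective: alternative
-- what changed: Instead of scanning all j up to sqrt(x) and collecting divisor/cofactor pairs, B factors x into prime powers by division-out trial division, generates every divisor as a product of prime powers, sorts, and drops the two trivial divisors.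
import Mathlib
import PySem

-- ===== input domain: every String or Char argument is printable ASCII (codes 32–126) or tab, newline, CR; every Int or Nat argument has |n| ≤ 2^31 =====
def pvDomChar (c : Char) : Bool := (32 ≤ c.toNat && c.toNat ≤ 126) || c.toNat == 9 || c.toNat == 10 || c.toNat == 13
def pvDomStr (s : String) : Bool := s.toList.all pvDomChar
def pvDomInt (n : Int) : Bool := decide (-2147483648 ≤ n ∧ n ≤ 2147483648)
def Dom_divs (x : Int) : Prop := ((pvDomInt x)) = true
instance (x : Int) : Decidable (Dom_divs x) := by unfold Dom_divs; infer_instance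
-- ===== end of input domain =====

-- B replaces A's sqrt-bounded scan collecting divisor/cofactor pairs by a different
-- algorithm: factor x into prime powers (trial division with division-out), generate
-- every divisor as a product of prime powers, sort, and drop the two trivial divisors.

-- ===== PORT A =====
-- while j*j < x: collect j into d and x//j into d1
-- (structural recursion on a fuel counter, which only makes the loop total: x.toNat + 2 - j
-- steps always suffice because the loop body runs only while j*j < x)
def divsGoA (fuel : Nat) (x : Int) (j : Nat) (d d1 : List Int) : Nat × List Int × List Int :=
  match fuel with
  | 0 => (j, d, d1)
  | fuel + 1 =>
    if (j : Int) * j < x then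
      if PySem.Int.mod x j = 0 then
        divsGoA fuel x (j + 1) (d ++ [(j : Int)]) (d1 ++ [PySem.Int.floordiv x (j : Int)])
      else
        divsGoA fuel x (j + 1) d d1
    else (j, d, d1)

def divsLoopA (x : Int) (j : Nat) (d d1 : List Int) : Nat × List Int × List Int :=
  divsGoA (x.toNat + 2 - j) x j d d1

def divs (x : Int) : List Int :=
  match divsLoopA x 2 [] [] with
  | (j, d, d1) => (if (j : Int) * j = x then d ++ [(j : Int)] else d) ++ d1.reverse

-- ===== PORT B =====
-- inner loop: while n % p == 0: n //= p; e += 1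
-- (structural recursion on a fuel counter; the 0 < n ∧ 2 ≤ p guard and the fuel only
-- make the recursion total — both always suffice whenever B's code runs it)
def divOutGo (p : Int) (fuel : Nat) (n : Int) (e : Int) : Int × Int :=
  match fuel with
  | 0 => (n, e)
  | fuel + 1 =>
    if 0 < n ∧ 2 ≤ p ∧ PySem.Int.mod n p = 0 then
      divOutGo p fuel (PySem.Int.floordiv n p) (e + 1)
    else (n, e)

def divOutB (p : Int) (n : Int) (e : Int) : Int × Int :=
  divOutGo p n.toNat n e

-- while p*p <= n: divide out p, append (p, e)  (fuel-counted for totality)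
def factGo (fuel : Nat) (n : Int) (p : Nat) (fac : List (Int × Int)) : Int × List (Int × Int) :=
  match fuel with
  | 0 => (n, fac)
  | fuel + 1 =>
    if (p : Int) * p ≤ n then
      if PySem.Int.mod n p = 0 then
        factGo fuel (divOutB p n 0).1 (p + 1) (fac ++ [((p : Int), (divOutB p n 0).2)])
      else
        factGo fuel n (p + 1) fac
    else (n, fac)

def factLoopB (n : Int) (p : Nat) (fac : List (Int × Int)) : Int × List (Int × Int) :=
  factGo (n.toNat + 2 - p) n p fac

-- ds = [d * p**k for d in ds for k in range(e + 1)], folded over fac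
def genDivsB (fac : List (Int × Int)) (ds : List Int) : List Int :=
  match fac with
  | [] => ds
  | (p, e) :: rest =>
      genDivsB rest (ds.flatMap (fun d => (PySem.List.pyRange 0 (e + 1) 1).map (fun k => d * p ^ k.toNat)))

def divs_alt (x : Int) : List Int :=
  if x < 2 then []
  else
    (PySem.List.sorted
        (genDivsB
          (if 1 < (factLoopB x 2 []).1 then (factLoopB x 2 []).2 ++ [((factLoopB x 2 []).1, 1)]
           else (factLoopB x 2 []).2)
          [1])
        (fun v => v) false).filter (fun d => d != 1 && d != x)

-- ===== PRECONDITION & SPEC =====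
def Spec_divs (x : Int) (out : List Int) : Prop := out = divs_alt x
instance (x : Int) (out : List Int) : Decidable (Spec_divs x out) := by unfold Spec_divs; infer_instance

-- ===== CLAIM (what is proved, stated in full; the proofs are below) =====
def Claim_equal_divs : Prop := ∀ (x : Int), Dom_divs x → Spec_divs x (divs x)

-- ===== LEMMAS AND PROOFS =====


theorem pvSqLt {a b : Int} (ha : 0 ≤ a) (hb : 0 ≤ b) (h : a * a < b * b) : a < b := by
  nlinarith

-- ---- A-side characterisation ----

-- ascending small divisors k ≥ j with k*k < x (the d list A's loop builds)
def smalls (x : Int) (j : Nat) : List Int :=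
  if h : (j : Int) * j < x then
    if PySem.Int.mod x j = 0 then (j : Int) :: smalls x (j + 1) else smalls x (j + 1)
  else []
termination_by x.toNat + 2 - j
decreasing_by
  all_goals
    have h1 : (j : Int) < x := by nlinarith [sq_nonneg ((j : Int) - 1)]
    omega

-- final value of j after A's loop
def stopA (x : Int) (j : Nat) : Nat :=
  if h : (j : Int) * j < x then stopA x (j + 1) else j
termination_by x.toNat + 2 - j
decreasing_by
  all_goals
    have h1 : (j : Int) < x := by nlinarith [sq_nonneg ((j : Int) - 1)]
    omega

theorem divsGoA_eq (fuel : Nat) :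
    ∀ (x : Int) (j : Nat) (d d1 : List Int), x.toNat + 2 - j ≤ fuel →
      divsGoA fuel x j d d1 =
        (stopA x j, d ++ smalls x j,
          d1 ++ (smalls x j).map (fun k => PySem.Int.floordiv x k)) := by
  induction fuel with
  | zero =>
    intro x j d d1 hf
    have hnlt : ¬ ((j : Int) * j < x) := by
      intro hlt
      have hjx : (j : Int) < x := by nlinarith [sq_nonneg ((j : Int) - 1)]
      omega
    rw [divsGoA, stopA, smalls]
    simp [hnlt]
  | succ fuel ih =>
    intro x j d d1 hf
    rw [divsGoA, stopA, smalls]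
    by_cases hlt : (j : Int) * j < x
    · have hjx : (j : Int) < x := by nlinarith [sq_nonneg ((j : Int) - 1)]
      by_cases hmod : PySem.Int.mod x j = 0
      · simp only [hlt, hmod, if_true, dite_true]
        rw [ih _ _ _ _ (by omega)]
        simp only [List.map_cons, List.append_assoc, List.singleton_append]
      · simp only [hlt, hmod, if_true, if_false, dite_true]
        exact ih _ _ _ _ (by omega)
    · simp [hlt]

theorem loopA_eq (x : Int) (j : Nat) (d d1 : List Int) :
    divsLoopA x j d d1 =
      (stopA x j, d ++ smalls x j,
        d1 ++ (smalls x j).map (fun k => PySem.Int.floordiv x k)) :=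
  divsGoA_eq (x.toNat + 2 - j) x j d d1 (le_refl _)

theorem mem_smalls (x : Int) (j : Nat) (v : Int) :
    v ∈ smalls x j ↔
      ∃ k : Nat, j ≤ k ∧ (k : Int) * k < x ∧ PySem.Int.mod x k = 0 ∧ v = (k : Int) := by
  fun_induction smalls x j with
  | case1 j hlt hmod ih =>
    simp only [List.mem_cons, ih]
    constructor
    · rintro (rfl | ⟨k, hk, h2, h3, rfl⟩)
      · exact ⟨j, le_refl _, hlt, hmod, rfl⟩
      · exact ⟨k, by omega, h2, h3, rfl⟩
    · rintro ⟨k, hk, h2, h3, rfl⟩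
      rcases Nat.eq_or_lt_of_le hk with rfl | h
      · exact Or.inl rfl
      · exact Or.inr ⟨k, by omega, h2, h3, rfl⟩
  | case2 j hlt hmod ih =>
    rw [ih]
    constructor
    · rintro ⟨k, hk, h2, h3, rfl⟩
      exact ⟨k, by omega, h2, h3, rfl⟩
    · rintro ⟨k, hk, h2, h3, rfl⟩
      rcases Nat.eq_or_lt_of_le hk with rfl | h
      · exact absurd h3 hmod
      · exact ⟨k, by omega, h2, h3, rfl⟩
  | case3 j hlt =>
    simp only [List.not_mem_nil, false_iff]
    rintro ⟨k, hk, h2, -, -⟩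
    have : (j : Int) * j ≤ (k : Int) * k := by exact_mod_cast Nat.mul_le_mul hk hk
    omega

theorem stopA_spec (x : Int) (j : Nat) :
    j ≤ stopA x j ∧ ¬ ((stopA x j : Int) * (stopA x j) < x) ∧
      ∀ k : Nat, j ≤ k → k < stopA x j → (k : Int) * k < x := by
  fun_induction stopA x j with
  | case1 j hlt ih =>
    obtain ⟨h1, h2, h3⟩ := ih
    refine ⟨by omega, h2, ?_⟩
    intro k hk hk2
    rcases Nat.eq_or_lt_of_le hk with rfl | h
    · exact hlt
    · exact h3 k (by omega) hk2
  | case2 j hlt =>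
    exact ⟨le_refl _, hlt, fun k hk hk2 => by omega⟩

theorem pairwise_smalls (x : Int) (j : Nat) : (smalls x j).Pairwise (· < ·) := by
  fun_induction smalls x j with
  | case1 j hlt hmod ih =>
    refine List.Pairwise.cons ?_ ih
    intro v hv
    obtain ⟨k, hk, -, -, rfl⟩ := (mem_smalls x (j + 1) v).1 hv
    exact_mod_cast hk
  | case2 j hlt hmod ih => exact ih
  | case3 j hlt => exact List.Pairwise.nil

-- k divides x exactly, and the cofactor is strictly larger than k
theorem div_facts (x : Int) (k : Nat) (h2 : 2 ≤ k) (hlt : (k : Int) * k < x)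
    (hm : PySem.Int.mod x k = 0) :
    (k : Int) * PySem.Int.floordiv x k = x ∧ (k : Int) < PySem.Int.floordiv x k := by
  have hk : (0 : Int) < k := by exact_mod_cast Nat.lt_of_lt_of_le (by omega) h2
  have hd : (k : Int) ∣ x := (PySem.Int.mod_eq_zero_iff_dvd x k).1 hm
  rw [PySem.Int.floordiv_eq_ediv_of_pos hk]
  have he : (k : Int) * (x / k) = x := Int.mul_ediv_cancel' hd
  refine ⟨he, ?_⟩
  nlinarith [he]

-- the list A returns, written via smalls/stopA
def LA (x : Int) : List Int :=
  (if ((stopA x 2 : Nat) : Int) * ((stopA x 2 : Nat) : Int) = x then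
      smalls x 2 ++ [((stopA x 2 : Nat) : Int)]
    else smalls x 2) ++
  ((smalls x 2).map (fun k => PySem.Int.floordiv x k)).reverse

theorem divs_eq_LA (x : Int) : divs x = LA x := by
  unfold divs LA
  rw [loopA_eq]
  simp

theorem pairwise_LA (x : Int) : (LA x).Pairwise (· < ·) := by
  obtain ⟨hst2, hstge, hstlt⟩ := stopA_spec x 2
  have hmem : ∀ v ∈ smalls x 2, ∃ k : Nat, 2 ≤ k ∧ (k : Int) * k < x ∧
      PySem.Int.mod x k = 0 ∧ v = (k : Int) := fun v hv => (mem_smalls x 2 v).1 hv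
  unfold LA
  rw [List.pairwise_append]
  refine ⟨?_, ?_, ?_⟩
  · split_ifs with hsq
    · rw [List.pairwise_append]
      refine ⟨pairwise_smalls x 2, List.pairwise_singleton _ _, ?_⟩
      intro a ha b hb
      simp only [List.mem_singleton] at hb
      subst hb
      obtain ⟨k, hk2, hklt, -, rfl⟩ := hmem a ha
      exact pvSqLt (Int.natCast_nonneg k) (Int.natCast_nonneg (stopA x 2)) (by omega)
    · exact pairwise_smalls x 2
  · rw [List.pairwise_reverse, List.pairwise_map]
    refine (pairwise_smalls x 2).imp_of_mem ?_
    intro a b ha hb hab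
    obtain ⟨k1, hk12, hk1lt, hk1m, rfl⟩ := hmem a ha
    obtain ⟨k2, hk22, hk2lt, hk2m, rfl⟩ := hmem b hb
    obtain ⟨he1, hq1⟩ := div_facts x k1 hk12 hk1lt hk1m
    obtain ⟨he2, hq2⟩ := div_facts x k2 hk22 hk2lt hk2m
    have hk1pos : (0 : Int) < k1 := by exact_mod_cast by omega
    nlinarith
  · intro a ha b hb
    rw [List.mem_reverse, List.mem_map] at hb
    obtain ⟨c, hc, rfl⟩ := hb
    obtain ⟨k, hk2, hklt, hkm, rfl⟩ := hmem c hc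
    obtain ⟨he, hq⟩ := div_facts x k hk2 hklt hkm
    have hkpos : (0 : Int) < k := by exact_mod_cast by omega
    have hqsq : x < PySem.Int.floordiv x k * PySem.Int.floordiv x k := by nlinarith
    split_ifs at ha with hsq
    · rw [List.mem_append, List.mem_singleton] at ha
      rcases ha with ha | rfl
      · obtain ⟨m, hm2, hmlt, -, rfl⟩ := hmem a ha
        exact pvSqLt (Int.natCast_nonneg m) (by omega) (by omega)
      · exact pvSqLt (Int.natCast_nonneg (stopA x 2)) (by omega) (by omega)
    · obtain ⟨m, hm2, hmlt, -, rfl⟩ := hmem a ha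
      exact pvSqLt (Int.natCast_nonneg m) (by omega) (by omega)

theorem mem_LA (x v : Int) :
    v ∈ LA x ↔ ∃ k : Nat, 2 ≤ k ∧ (k : Int) * k ≤ x ∧ PySem.Int.mod x k = 0 ∧
      (v = (k : Int) ∨ v = PySem.Int.floordiv x (k : Int)) := by
  obtain ⟨hst2, hstge, hstlt⟩ := stopA_spec x 2
  unfold LA
  simp only [List.mem_append, List.mem_reverse, List.mem_map]
  constructor
  · rintro (hv | ⟨c, hc, rfl⟩)
    · split_ifs at hv with hsq
      · rw [List.mem_append, List.mem_singleton] at hv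
        rcases hv with hv | rfl
        · obtain ⟨k, hk2, hklt, hkm, rfl⟩ := (mem_smalls x 2 _).1 hv
          exact ⟨k, hk2, le_of_lt hklt, hkm, Or.inl rfl⟩
        · refine ⟨stopA x 2, hst2, le_of_eq hsq, ?_, Or.inl rfl⟩
          exact (PySem.Int.mod_eq_zero_iff_dvd x (stopA x 2)).2 ⟨stopA x 2, hsq.symm⟩
      · obtain ⟨k, hk2, hklt, hkm, rfl⟩ := (mem_smalls x 2 _).1 hv
        exact ⟨k, hk2, le_of_lt hklt, hkm, Or.inl rfl⟩
    · obtain ⟨k, hk2, hklt, hkm, rfl⟩ := (mem_smalls x 2 _).1 hc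
      exact ⟨k, hk2, le_of_lt hklt, hkm, Or.inr rfl⟩
  · rintro ⟨k, hk2, hkle, hkm, hv⟩
    rcases lt_or_eq_of_le hkle with hklt | hksq
    · rcases hv with rfl | rfl
      · exact Or.inl (by
          split_ifs with hsq
          · exact List.mem_append.2 (Or.inl ((mem_smalls x 2 _).2 ⟨k, hk2, hklt, hkm, rfl⟩))
          · exact (mem_smalls x 2 _).2 ⟨k, hk2, hklt, hkm, rfl⟩)
      · exact Or.inr ⟨(k : Int), (mem_smalls x 2 _).2 ⟨k, hk2, hklt, hkm, rfl⟩, rfl⟩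
    · -- perfect square: k = stopA x 2
      have hkst : stopA x 2 = k := by
        rcases lt_trichotomy (stopA x 2) k with h | h | h
        · have hlt2 : ((stopA x 2 : Nat) : Int) * (stopA x 2 : Nat) < (k : Int) * k := by
            exact_mod_cast Nat.mul_lt_mul_of_lt_of_le h (le_of_lt h) (by omega)
          omega
        · exact h
        · have := hstlt k hk2 h
          omega
      have hsq : ((stopA x 2 : Nat) : Int) * (stopA x 2 : Nat) = x := by rw [hkst]; exact hksq
      have hfk : PySem.Int.floordiv x (k : Int) = (k : Int) := by
        have hkpos : (0 : Int) < k := by exact_mod_cast (by omega : 0 < k)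
        rw [PySem.Int.floordiv_eq_ediv_of_pos hkpos, ← hksq,
          Int.mul_ediv_cancel_left _ (by omega)]
      refine Or.inl ?_
      rw [if_pos hsq, List.mem_append, List.mem_singleton]
      rcases hv with rfl | rfl
      · exact Or.inr (by rw [hkst])
      · exact Or.inr (by rw [hfk, hkst])

theorem mem_LA_iff (x v : Int) : v ∈ LA x ↔ (v ∣ x ∧ 1 < v ∧ v < x) := by
  rw [mem_LA]
  constructor
  · rintro ⟨k, hk2, hkle, hkm, hv⟩
    have h2k : (2 : Int) ≤ (k : Int) := by exact_mod_cast hk2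
    have hk0 : (0 : Int) < k := by omega
    have hdvd : (k : Int) ∣ x := (PySem.Int.mod_eq_zero_iff_dvd x k).1 hkm
    have hfd : PySem.Int.floordiv x (k : Int) = x / (k : Int) :=
      PySem.Int.floordiv_eq_ediv_of_pos hk0
    have he : (k : Int) * (x / (k : Int)) = x := Int.mul_ediv_cancel' hdvd
    rcases hv with rfl | rfl
    · exact ⟨hdvd, by omega, by nlinarith⟩
    · rw [hfd]
      refine ⟨⟨(k : Int), by linarith [he, mul_comm (x / (k : Int)) (k : Int)]⟩, ?_, ?_⟩
      · nlinarith
      · nlinarith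
  · rintro ⟨hdvd, h1, hvx⟩
    have hv0 : (0 : Int) < v := by omega
    have hx3 : (3 : Int) ≤ x := by omega
    obtain ⟨c, hc⟩ := hdvd
    have hc0 : (0 : Int) < c := by nlinarith
    have hcne : c ≠ 1 := by
      intro hc1
      rw [hc1, mul_one] at hc
      omega
    have hc2 : (2 : Int) ≤ c := by omega
    rcases le_total (v * v) x with hle | hgt
    · refine ⟨v.toNat, by omega, ?_, ?_, Or.inl ?_⟩
      · rw [Int.toNat_of_nonneg (by omega)]; exact hle
      · rw [Int.toNat_of_nonneg (by omega)]
        exact (PySem.Int.mod_eq_zero_iff_dvd x v).2 ⟨c, hc⟩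
      · rw [Int.toNat_of_nonneg (by omega)]
    · have hcv : c ≤ v := by nlinarith
      have hcc : c * c ≤ x := by nlinarith
      refine ⟨c.toNat, by omega, ?_, ?_, Or.inr ?_⟩
      · rw [Int.toNat_of_nonneg (by omega)]; exact hcc
      · rw [Int.toNat_of_nonneg (by omega)]
        exact (PySem.Int.mod_eq_zero_iff_dvd x c).2 ⟨v, by rw [hc, mul_comm]⟩
      · rw [Int.toNat_of_nonneg (by omega),
          PySem.Int.floordiv_eq_ediv_of_pos hc0, hc, mul_comm,
          Int.mul_ediv_cancel_left _ (by omega)]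

-- two strictly increasing lists with the same members are equal
theorem eq_of_pairwise_lt_of_mem_iff (l1 l2 : List Int) (h1 : l1.Pairwise (· < ·))
    (h2 : l2.Pairwise (· < ·)) (h : ∀ v, v ∈ l1 ↔ v ∈ l2) : l1 = l2 := by
  exact List.Perm.eq_of_pairwise (fun a b _ _ ha hb => absurd hb (lt_asymm ha)) h1 h2
    ((List.perm_ext_iff_of_nodup (h1.imp fun {a b} h => ne_of_lt h)
      (h2.imp fun {a b} h => ne_of_lt h)).2 h)

-- ---- B-side characterisation ----

theorem divOutGo_fst_toNat_le (p : Int) (fuel : Nat) :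
    ∀ (n e : Int), (divOutGo p fuel n e).1.toNat ≤ n.toNat := by
  induction fuel with
  | zero => intro n e; exact le_refl _
  | succ fuel ih =>
    intro n e
    rw [divOutGo]
    split_ifs with h
    · obtain ⟨hn, hp, -⟩ := h
      have h1 : PySem.Int.floordiv n p = n / p := PySem.Int.floordiv_eq_ediv_of_pos (by omega)
      have h2 : n / p < n := by
        apply Int.ediv_lt_of_lt_mul (by omega)
        nlinarith
      have := ih (PySem.Int.floordiv n p) (e + 1)
      omega
    · exact le_refl _

theorem divOutB_fst_toNat_le (p n e : Int) : (divOutB p n e).1.toNat ≤ n.toNat :=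
  divOutGo_fst_toNat_le p n.toNat n e

theorem divOutGo_spec (p : Int) (fuel : Nat) :
    ∀ (n e0 : Int), 0 < n → 2 ≤ p → n.toNat ≤ fuel →
    0 < (divOutGo p fuel n e0).1 ∧ ¬ p ∣ (divOutGo p fuel n e0).1 ∧
      ∃ k : Nat, (divOutGo p fuel n e0).2 = e0 + k ∧ n = (divOutGo p fuel n e0).1 * p ^ k ∧
        (p ∣ n → 1 ≤ k) := by
  induction fuel with
  | zero =>
    intro n e0 hn hp hf
    omega
  | succ fuel ih =>
    intro n e0 hn hp hf
    rw [divOutGo]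
    by_cases h : 0 < n ∧ 2 ≤ p ∧ PySem.Int.mod n p = 0
    · rw [if_pos h]
      obtain ⟨-, -, hmod⟩ := h
      have hdvd : p ∣ n := (PySem.Int.mod_eq_zero_iff_dvd n p).1 hmod
      have hfd : PySem.Int.floordiv n p = n / p := PySem.Int.floordiv_eq_ediv_of_pos (by omega)
      have hpn : p ≤ n := Int.le_of_dvd hn hdvd
      have hlt : n / p < n := by
        apply Int.ediv_lt_of_lt_mul (by omega)
        nlinarith
      have hn' : 0 < PySem.Int.floordiv n p := by
        rw [hfd]
        rw [Int.lt_ediv_iff_mul_lt (by omega) hdvd]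
        omega
      obtain ⟨h1, h2, k', hk1, hk2, -⟩ := ih (PySem.Int.floordiv n p) (e0 + 1) hn' hp
        (by rw [hfd]; omega)
      refine ⟨h1, h2, k' + 1, by push_cast [hk1]; ring, ?_, fun _ => by omega⟩
      have he : n / p * p = n := Int.ediv_mul_cancel hdvd
      rw [pow_succ, ← mul_assoc, ← hk2, hfd, he]
    · rw [if_neg h]
      have hmod : PySem.Int.mod n p ≠ 0 := by
        intro hc
        exact h ⟨hn, hp, hc⟩
      have hnd : ¬ p ∣ n := fun hd => hmod ((PySem.Int.mod_eq_zero_iff_dvd n p).2 hd)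
      exact ⟨hn, hnd, 0, by simp, by simp, fun hd => absurd hd hnd⟩

theorem divOutB_spec (p n e0 : Int) :
    0 < n → 2 ≤ p →
    0 < (divOutB p n e0).1 ∧ ¬ p ∣ (divOutB p n e0).1 ∧
      ∃ k : Nat, (divOutB p n e0).2 = e0 + k ∧ n = (divOutB p n e0).1 * p ^ k ∧
        (p ∣ n → 1 ≤ k) := by
  intro hn hp
  exact divOutGo_spec p n.toNat n e0 hn hp (le_refl _)

-- the factor entries / leftover cofactor factLoopB produces
def facF (n : Int) (p : Nat) : List (Int × Int) :=
  if h : (p : Int) * p ≤ n then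
    if PySem.Int.mod n p = 0 then
      ((p : Int), (divOutB p n 0).2) :: facF (divOutB p n 0).1 (p + 1)
    else facF n (p + 1)
  else []
termination_by n.toNat + 2 - p
decreasing_by
  all_goals
    have hb : (p : Int) ≤ n ∨ p ≤ 1 := by
      by_cases h' : p ≤ 1
      · exact Or.inr h'
      · left
        replace h' : 1 < p := by omega
        have : (2 : Int) ≤ (p : Int) := by exact_mod_cast h'
        nlinarith
  · have := divOutB_fst_toNat_le p n 0
    omega
  · omega

def finN (n : Int) (p : Nat) : Int :=
  if h : (p : Int) * p ≤ n then
    if PySem.Int.mod n p = 0 then finN (divOutB p n 0).1 (p + 1)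
    else finN n (p + 1)
  else n
termination_by n.toNat + 2 - p
decreasing_by
  all_goals
    have hb : (p : Int) ≤ n ∨ p ≤ 1 := by
      by_cases h' : p ≤ 1
      · exact Or.inr h'
      · left
        replace h' : 1 < p := by omega
        have : (2 : Int) ≤ (p : Int) := by exact_mod_cast h'
        nlinarith
  · have := divOutB_fst_toNat_le p n 0
    omega
  · omega

theorem factGo_eq (fuel : Nat) :
    ∀ (n : Int) (p : Nat) (fac : List (Int × Int)), n.toNat + 2 - p ≤ fuel →
      factGo fuel n p fac = (finN n p, fac ++ facF n p) := by
  induction fuel with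
  | zero =>
    intro n p fac hf
    have hnle : ¬ ((p : Int) * p ≤ n) := by
      intro hle
      have hp2 : (2 : Int) ≤ (p : Int) := by exact_mod_cast (by omega : 2 ≤ p)
      have hpn : (p : Int) ≤ n := by nlinarith
      omega
    rw [factGo, finN, facF]
    simp [hnle]
  | succ fuel ih =>
    intro n p fac hf
    rw [factGo, finN, facF]
    by_cases hle : (p : Int) * p ≤ n
    · by_cases hmod : PySem.Int.mod n p = 0
      · have := divOutB_fst_toNat_le p n 0
        simp only [hle, hmod, if_true, dite_true]
        rw [ih _ _ _ (by omega)]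
        simp only [List.append_assoc, List.singleton_append]
      · simp only [hle, hmod, if_true, if_false, dite_true]
        exact ih _ _ _ (by omega)
    · simp [hle]

theorem factLoopB_eq (n : Int) (p : Nat) (fac : List (Int × Int)) :
    factLoopB n p fac = (finN n p, fac ++ facF n p) :=
  factGo_eq (n.toNat + 2 - p) n p fac (le_refl _)

theorem facF_spec (n : Int) (p : Nat) :
    2 ≤ p → 0 < n → (∀ m : Int, 2 ≤ m → m < (p : Int) → ¬ m ∣ n) →
    (∀ qe ∈ facF n p, (p : Int) ≤ qe.1 ∧ 1 ≤ qe.2 ∧ Nat.Prime qe.1.toNat) ∧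
    (facF n p).Pairwise (fun a b => a.1 < b.1) ∧
    0 < finN n p ∧
    (1 < finN n p → Nat.Prime (finN n p).toNat ∧ (p : Int) ≤ finN n p ∧
      ∀ qe ∈ facF n p, qe.1 < finN n p) ∧
    (facF n p).foldr (fun qe acc => qe.1 ^ qe.2.toNat * acc) (finN n p) = n := by
  fun_induction facF n p with
  | case1 n p hle hmod ih =>
    intro hp hn hinv
    have hp2 : (2 : Int) ≤ (p : Int) := by exact_mod_cast hp
    have hfe : finN n p = finN (divOutB p n 0).1 (p + 1) := by
      rw [finN]
      simp [hle, hmod]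
    obtain ⟨hr1, hr2, k, hk1, hk2, hk3⟩ := divOutB_spec (p : Int) n 0 hn hp2
    have hdvd : (p : Int) ∣ n := (PySem.Int.mod_eq_zero_iff_dvd n p).1 hmod
    have hk0 : 1 ≤ k := hk3 hdvd
    have hrdvd : (divOutB p n 0).1 ∣ n := ⟨(p : Int) ^ k, hk2⟩
    have hprime : Nat.Prime ((p : Int)).toNat := by
      rw [Int.toNat_natCast, Nat.prime_def_lt]
      refine ⟨hp, fun m hm hmd => ?_⟩
      by_contra hne
      rcases Nat.eq_zero_or_pos m with rfl | hm0
      · obtain rfl : p = 0 := Nat.eq_zero_of_zero_dvd hmd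
        omega
      · have hm2 : 2 ≤ m := by omega
        refine hinv (m : Int) (by exact_mod_cast hm2) (by exact_mod_cast hm) ?_
        exact dvd_trans (by exact_mod_cast hmd) hdvd
    have hinv' : ∀ m : Int, 2 ≤ m → m < ((p + 1 : Nat) : Int) → ¬ m ∣ (divOutB p n 0).1 := by
      intro m hm2 hmp hmd
      have hmp' : m ≤ (p : Int) := by push_cast at hmp; omega
      rcases eq_or_lt_of_le hmp' with rfl | hlt
      · exact hr2 hmd
      · exact hinv m hm2 hlt (dvd_trans hmd hrdvd)
    obtain ⟨C1, C2, C3, C4, C5⟩ := ih (by omega) hr1 hinv'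
    rw [hfe]
    refine ⟨?_, ?_, C3, ?_, ?_⟩
    · intro qe hqe
      rcases List.mem_cons.1 hqe with rfl | hqe
      · refine ⟨le_refl _, ?_, hprime⟩
        have : (divOutB p n 0).2 = (k : Int) := by rw [hk1]; ring
        rw [this]
        exact_mod_cast hk0
      · obtain ⟨hq1, hq2, hq3⟩ := C1 qe hqe
        exact ⟨by push_cast at hq1 ⊢; omega, hq2, hq3⟩
    · refine List.Pairwise.cons ?_ C2
      intro qe hqe
      have := (C1 qe hqe).1
      show (p : Int) < qe.1
      push_cast at this
      omega
    · intro h1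
      obtain ⟨P1, P2, P3⟩ := C4 h1
      refine ⟨P1, by push_cast at P2 ⊢; omega, ?_⟩
      intro qe hqe
      rcases List.mem_cons.1 hqe with rfl | hqe
      · show (p : Int) < finN (divOutB p n 0).1 (p + 1)
        push_cast at P2
        omega
      · exact P3 qe hqe
    · simp only [List.foldr_cons, C5]
      have hkt : ((divOutB p n 0).2).toNat = k := by
        rw [hk1]
        simp
      rw [hkt, mul_comm]
      exact hk2.symm
  | case2 n p hle hmod ih =>
    intro hp hn hinv
    have hfe : finN n p = finN n (p + 1) := by
      rw [finN]
      simp [hle, hmod]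
    have hinv' : ∀ m : Int, 2 ≤ m → m < ((p + 1 : Nat) : Int) → ¬ m ∣ n := by
      intro m hm2 hmp hmd
      have hmp' : m ≤ (p : Int) := by push_cast at hmp; omega
      rcases eq_or_lt_of_le hmp' with heq | hlt
      · rw [heq] at hmd
        exact hmod ((PySem.Int.mod_eq_zero_iff_dvd n (p : Int)).2 hmd)
      · exact hinv m hm2 hlt hmd
    obtain ⟨C1, C2, C3, C4, C5⟩ := ih (by omega) hn hinv'
    rw [hfe]
    refine ⟨?_, C2, C3, ?_, C5⟩
    · intro qe hqe
      obtain ⟨hq1, hq2, hq3⟩ := C1 qe hqe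
      exact ⟨by push_cast at hq1 ⊢; omega, hq2, hq3⟩
    · intro h1
      obtain ⟨P1, P2, P3⟩ := C4 h1
      exact ⟨P1, by push_cast at P2 ⊢; omega, P3⟩
  | case3 n p hle =>
    intro hp hn hinv
    have hfe : finN n p = n := by
      rw [finN]
      simp [hle]
    rw [hfe]
    refine ⟨by simp, by simp, hn, ?_, by simp⟩
    intro h1
    refine ⟨?_, ?_, by simp⟩
    · rw [Nat.prime_def_lt]
      refine ⟨by omega, fun m hm hmd => ?_⟩
      by_contra hne
      rcases Nat.eq_zero_or_pos m with rfl | hm0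
      · obtain h0 : n.toNat = 0 := Nat.eq_zero_of_zero_dvd hmd
        omega
      have hm2 : 2 ≤ m := by omega
      have hmI : (m : Int) ∣ n := by
        have := Int.natCast_dvd_natCast.2 hmd
        rwa [Int.toNat_of_nonneg (by omega)] at this
      obtain ⟨c, hc⟩ := hmI
      have hmI2 : (2 : Int) ≤ (m : Int) := by exact_mod_cast hm2
      have hmltn : (m : Int) < n := by
        have := hm
        rw [← Int.toNat_of_nonneg (le_of_lt hn)]
        exact_mod_cast this
      have hc1 : 0 < c := by nlinarith
      have hcne : c ≠ 1 := by
        intro h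
        rw [h, mul_one] at hc
        omega
      have hc2 : (2 : Int) ≤ c := by omega
      rcases le_total ((m : Int) * (m : Int)) n with hmm | hmm
      · have hmp : (m : Int) < (p : Int) := pvSqLt (by positivity) (by positivity) (by omega)
        exact hinv (m : Int) hmI2 hmp ⟨c, hc⟩
      · have hcm : c ≤ (m : Int) := by nlinarith
        have hcc : c * c ≤ n := by nlinarith
        have hcp : c < (p : Int) := pvSqLt (by omega) (by positivity) (by omega)
        exact hinv c hc2 hcp ⟨(m : Int), by rw [hc, mul_comm]⟩
    · by_contra hcon
      exact hinv n (by omega) (by omega) dvd_rfl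

theorem nat_divisor_decomp (N p : Nat) (hp : p.Prime) (e t : Nat) (ht : t ∣ N * p ^ e) :
    ∃ d k, d ∣ N ∧ k ≤ e ∧ t = d * p ^ k := by
  induction e generalizing t with
  | zero =>
    rw [pow_zero, mul_one] at ht
    exact ⟨t, 0, ht, le_refl _, by ring⟩
  | succ e ih =>
    by_cases hpt : p ∣ t
    · obtain ⟨t', rfl⟩ := hpt
      have hp0 : 0 < p := hp.pos
      have ht' : t' ∣ N * p ^ e := by
        have h2 : p * t' ∣ p * (N * p ^ e) := by
          have : p * (N * p ^ e) = N * p ^ (e + 1) := by ring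
          rw [this]
          exact ht
        exact (mul_dvd_mul_iff_left (by omega : p ≠ 0)).1 h2
      obtain ⟨d, k, hd, hk, rfl⟩ := ih t' ht'
      exact ⟨d, k + 1, hd, by omega, by ring⟩
    · have hcop : Nat.Coprime t (p ^ (e + 1)) :=
        Nat.Coprime.pow_right _ ((Nat.Prime.coprime_iff_not_dvd hp).2 hpt).symm
      have htN : t ∣ N := hcop.dvd_of_dvd_mul_right ht
      exact ⟨t, 0, htN, by omega, by ring⟩

theorem int_divisor_iff (N p : Int) (e : Nat) (t : Int) (hN : 0 < N) (hp : 2 ≤ p)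
    (hpr : Nat.Prime p.toNat) :
    (t ∣ N * p ^ e ∧ 0 < t) ↔ ∃ d k, d ∣ N ∧ 0 < d ∧ k ≤ e ∧ t = d * p ^ k := by
  have hp0 : (0 : Int) < p := by omega
  constructor
  · rintro ⟨hdvd, ht⟩
    have hcast : ((N.toNat * p.toNat ^ e : Nat) : Int) = N * p ^ e := by
      push_cast [Int.toNat_of_nonneg (le_of_lt hN), Int.toNat_of_nonneg (le_of_lt hp0)]
      ring
    have hdN : t.toNat ∣ N.toNat * p.toNat ^ e := by
      rw [← Int.natCast_dvd_natCast, hcast, Int.toNat_of_nonneg (le_of_lt ht)]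
      exact hdvd
    obtain ⟨d, k, hd, hk, heq⟩ := nat_divisor_decomp N.toNat p.toNat hpr e t.toNat hdN
    have hd0 : 0 < d := Nat.pos_of_dvd_of_pos hd (by omega)
    refine ⟨(d : Int), k, ?_, by exact_mod_cast hd0, hk, ?_⟩
    · rw [← Int.toNat_of_nonneg (le_of_lt hN)]
      exact_mod_cast hd
    · rw [← Int.toNat_of_nonneg (le_of_lt ht), ← Int.toNat_of_nonneg (le_of_lt hp0)]
      exact_mod_cast heq
  · rintro ⟨d, k, hd, hd0, hk, rfl⟩
    constructor
    · exact mul_dvd_mul hd (pow_dvd_pow p hk)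
    · positivity

theorem padic_cancel_aux (p d1 d2 : Int) (a b : Nat) (hp : 2 ≤ p) (h1 : ¬ p ∣ d1)
    (hab : a ≤ b) (h : d1 * p ^ a = d2 * p ^ b) : a = b ∧ d1 = d2 := by
  have hpa : (p : Int) ^ a ≠ 0 := pow_ne_zero a (by omega)
  have hsplit : d2 * p ^ b = d2 * p ^ (b - a) * p ^ a := by
    rw [mul_assoc, ← pow_add]
    congr 2
    omega
  rw [hsplit] at h
  have hd12 : d1 = d2 * p ^ (b - a) := mul_right_cancel₀ hpa h
  rcases Nat.eq_or_lt_of_le hab with rfl | hlt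
  · refine ⟨rfl, ?_⟩
    simpa using hd12
  · exfalso
    refine h1 ?_
    rw [hd12]
    exact Dvd.dvd.mul_left (dvd_pow_self p (by omega : b - a ≠ 0)) d2

theorem padic_cancel (p d1 d2 : Int) (a b : Nat) (hp : 2 ≤ p) (h1 : ¬ p ∣ d1)
    (h2 : ¬ p ∣ d2) (h : d1 * p ^ a = d2 * p ^ b) : a = b ∧ d1 = d2 := by
  rcases le_total a b with hab | hab
  · exact padic_cancel_aux p d1 d2 a b hp h1 hab h
  · obtain ⟨hba, hdd⟩ := padic_cancel_aux p d2 d1 b a hp h2 hab h.symm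
    exact ⟨hba.symm, hdd.symm⟩

theorem foldr_prod (F : List (Int × Int)) (M : Int) :
    F.foldr (fun qe acc => qe.1 ^ qe.2.toNat * acc) M =
      F.foldr (fun qe acc => qe.1 ^ qe.2.toNat * acc) 1 * M := by
  induction F with
  | nil => simp
  | cons qe rest ih => simp [List.foldr_cons, ih]; ring

theorem not_dvd_one_int (p : Int) (hp : 2 ≤ p) : ¬ p ∣ (1 : Int) := by
  intro h
  have := Int.le_of_dvd one_pos h
  omega

theorem genDivsB_spec (F : List (Int × Int)) : ∀ (ds : List Int) (N : Int), 0 < N →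
    ds.Nodup → (∀ t, t ∈ ds ↔ t ∣ N ∧ 0 < t) →
    (∀ qe ∈ F, 2 ≤ qe.1 ∧ Nat.Prime qe.1.toNat ∧ 1 ≤ qe.2 ∧ ¬ qe.1 ∣ N) →
    F.Pairwise (fun a b => a.1 < b.1) →
    (genDivsB F ds).Nodup ∧ ∀ t, t ∈ genDivsB F ds ↔
      (t ∣ F.foldr (fun qe acc => qe.1 ^ qe.2.toNat * acc) N ∧ 0 < t) := by
  induction F with
  | nil =>
    intro ds N hN hnd hmem hF hFp
    exact ⟨hnd, by simpa using hmem⟩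
  | cons qe rest ih =>
    intro ds N hN hnd hmem hF hFp
    obtain ⟨p, e⟩ := qe
    obtain ⟨hp2, hppr, he1, hpN⟩ := hF (p, e) List.mem_cons_self
    simp only at hp2 hppr he1 hpN
    have hpndvd : ∀ d ∈ ds, ¬ p ∣ d := by
      intro d hd hpd
      exact hpN (dvd_trans hpd ((hmem d).1 hd).1)
    have hmemiff : ∀ t, (t ∣ N * p ^ e.toNat ∧ 0 < t) ↔
        ∃ d k, d ∣ N ∧ 0 < d ∧ k ≤ e.toNat ∧ t = d * p ^ k :=
      fun t => int_divisor_iff N p e.toNat t hN hp2 hppr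
    have hmem' : ∀ t,
        t ∈ ds.flatMap (fun d => (PySem.List.pyRange 0 (e + 1) 1).map (fun k => d * p ^ k.toNat)) ↔
          t ∣ N * p ^ e.toNat ∧ 0 < t := by
      intro t
      rw [List.mem_flatMap, hmemiff t]
      constructor
      · rintro ⟨d, hd, ht⟩
        rw [List.mem_map] at ht
        obtain ⟨k, hk, rfl⟩ := ht
        rw [PySem.List.mem_pyRange_one] at hk
        obtain ⟨hdN, hd0⟩ := (hmem d).1 hd
        exact ⟨d, k.toNat, hdN, hd0, by omega, rfl⟩
      · rintro ⟨d, k, hdN, hd0, hk, rfl⟩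
        refine ⟨d, (hmem d).2 ⟨hdN, hd0⟩, ?_⟩
        rw [List.mem_map]
        refine ⟨(k : Int), ?_, by rw [Int.toNat_natCast]⟩
        rw [PySem.List.mem_pyRange_one]
        omega
    have hnd' :
        (ds.flatMap (fun d => (PySem.List.pyRange 0 (e + 1) 1).map (fun k => d * p ^ k.toNat))).Nodup := by
      rw [List.nodup_flatMap]
      constructor
      · intro d hd
        have hd0 : 0 < d := ((hmem d).1 hd).2
        refine List.Nodup.map_on ?_ (PySem.List.nodup_pyRange_one 0 (e + 1))
        intro k1 hk1 k2 hk2 heq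
        rw [PySem.List.mem_pyRange_one] at hk1 hk2
        have := mul_left_cancel₀ (by omega : d ≠ 0) heq
        have h11 : (1 : Int) * p ^ k1.toNat = 1 * p ^ k2.toNat := by rw [one_mul, one_mul, this]
        obtain ⟨hke, -⟩ := padic_cancel p 1 1 k1.toNat k2.toNat hp2
          (not_dvd_one_int p hp2) (not_dvd_one_int p hp2) h11
        omega
      · refine hnd.imp_of_mem ?_
        intro d1 d2 hd1 hd2 hne t ht1 ht2
        rw [List.mem_map] at ht1 ht2
        obtain ⟨k1, hk1, heq1⟩ := ht1
        obtain ⟨k2, hk2, heq2⟩ := ht2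
        obtain ⟨-, hdd⟩ := padic_cancel p d1 d2 k1.toNat k2.toNat hp2
          (hpndvd d1 hd1) (hpndvd d2 hd2) (by rw [heq1, heq2])
        exact hne hdd
    have hF' : ∀ qe ∈ rest, 2 ≤ qe.1 ∧ Nat.Prime qe.1.toNat ∧ 1 ≤ qe.2 ∧
        ¬ qe.1 ∣ N * p ^ e.toNat := by
      intro qe' hqe'
      obtain ⟨hq2, hqpr, hqe1, hqN⟩ := hF qe' (List.mem_cons_of_mem _ hqe')
      refine ⟨hq2, hqpr, hqe1, ?_⟩
      intro hq
      have hplt : p < qe'.1 := (List.pairwise_cons.1 hFp).1 qe' hqe'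
      have hq0 : (0 : Int) < qe'.1 := by omega
      have hcast : ((N.toNat * p.toNat ^ e.toNat : Nat) : Int) = N * p ^ e.toNat := by
        push_cast [Int.toNat_of_nonneg (le_of_lt hN), Int.toNat_of_nonneg (by omega : (0:Int) ≤ p)]
        ring
      have hqnat : qe'.1.toNat ∣ N.toNat * p.toNat ^ e.toNat := by
        rw [← Int.natCast_dvd_natCast, hcast, Int.toNat_of_nonneg (le_of_lt hq0)]
        exact hq
      rcases (Nat.Prime.dvd_mul hqpr).1 hqnat with hcase | hcase
      · refine hqN ?_
        have := Int.natCast_dvd_natCast.2 hcase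
        rwa [Int.toNat_of_nonneg (le_of_lt hq0), Int.toNat_of_nonneg (le_of_lt hN)] at this
      · have hqp : qe'.1.toNat ∣ p.toNat := Nat.Prime.dvd_of_dvd_pow hqpr hcase
        rcases (Nat.Prime.eq_one_or_self_of_dvd hppr _ hqp) with h1 | h1
        · omega
        · omega
    have hfold : rest.foldr (fun qe acc => qe.1 ^ qe.2.toNat * acc) (N * p ^ e.toNat) =
        p ^ e.toNat * rest.foldr (fun qe acc => qe.1 ^ qe.2.toNat * acc) N := by
      rw [foldr_prod rest (N * p ^ e.toNat), foldr_prod rest N]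
      ring
    obtain ⟨hndR, hmemR⟩ := ih _ (N * p ^ e.toNat) (by positivity) hnd' hmem' hF'
      (List.pairwise_cons.1 hFp).2
    refine ⟨hndR, ?_⟩
    intro t
    rw [show genDivsB ((p, e) :: rest) ds =
        genDivsB rest (ds.flatMap (fun d => (PySem.List.pyRange 0 (e + 1) 1).map
          (fun k => d * p ^ k.toNat))) from rfl]
    rw [hmemR t, List.foldr_cons]
    simp only []
    rw [← hfold]

theorem divs_alt_eq (x : Int) (hx : ¬ x < 2) :
    divs_alt x =
      (PySem.List.sorted
        (genDivsB
          (if 1 < finN x 2 then facF x 2 ++ [(finN x 2, 1)] else facF x 2) [1])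
        (fun v => v) false).filter (fun d => d != 1 && d != x) := by
  unfold divs_alt
  rw [if_neg hx, factLoopB_eq]
  simp only [List.nil_append]

-- ===== VERDICT (by name: the statement is the Claim_ definition above) =====
theorem divs_spec : Claim_equal_divs := by
  intro x _
  unfold Spec_divs
  rw [divs_eq_LA]
  by_cases hx : x < 2
  · rw [show divs_alt x = [] from by unfold divs_alt; rw [if_pos hx]]
    rw [List.eq_nil_iff_forall_not_mem]
    intro v hv
    obtain ⟨-, h1, h2⟩ := (mem_LA_iff x v).1 hv
    omega
  · have hx2 : (2 : Int) ≤ x := by omega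
    rw [divs_alt_eq x hx]
    obtain ⟨C1, C2, C3, C4, C5⟩ := facF_spec x 2 (le_refl 2) (by omega)
      (fun m hm2 hmlt _ => by push_cast at hmlt; omega)
    set F := if 1 < finN x 2 then facF x 2 ++ [(finN x 2, 1)] else facF x 2 with hF
    have hFall : ∀ qe ∈ F, 2 ≤ qe.1 ∧ Nat.Prime qe.1.toNat ∧ 1 ≤ qe.2 ∧ ¬ qe.1 ∣ (1 : Int) := by
      intro qe hqe
      have hbase : 2 ≤ qe.1 ∧ Nat.Prime qe.1.toNat ∧ 1 ≤ qe.2 := by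
        rw [hF] at hqe
        split_ifs at hqe with hfin
        · rcases List.mem_append.1 hqe with hqe | hqe
          · obtain ⟨hq1, hq2, hq3⟩ := C1 qe hqe
            exact ⟨by push_cast at hq1; omega, hq3, hq2⟩
          · rw [List.mem_singleton] at hqe
            subst hqe
            obtain ⟨P1, P2, -⟩ := C4 hfin
            exact ⟨by push_cast at P2; omega, P1, le_refl _⟩
        · obtain ⟨hq1, hq2, hq3⟩ := C1 qe hqe
          exact ⟨by push_cast at hq1; omega, hq3, hq2⟩
      exact ⟨hbase.1, hbase.2.1, hbase.2.2, not_dvd_one_int qe.1 hbase.1⟩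
    have hFpair : F.Pairwise (fun a b => a.1 < b.1) := by
      rw [hF]
      split_ifs with hfin
      · rw [List.pairwise_append]
        refine ⟨C2, List.pairwise_singleton _ _, ?_⟩
        intro a ha b hb
        rw [List.mem_singleton] at hb
        subst hb
        exact (C4 hfin).2.2 a ha
      · exact C2
    have hfoldF : F.foldr (fun qe acc => qe.1 ^ qe.2.toNat * acc) 1 = x := by
      rw [hF]
      split_ifs with hfin
      · rw [List.foldr_append]
        simpa using C5
      · have hone : finN x 2 = 1 := by omega
        rw [← hone]
        exact C5
    have hbase : ∀ t, t ∈ [(1 : Int)] ↔ t ∣ 1 ∧ 0 < t := by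
      intro t
      rw [List.mem_singleton]
      constructor
      · rintro rfl
        exact ⟨dvd_refl 1, one_pos⟩
      · rintro ⟨hd, ht⟩
        have := Int.le_of_dvd one_pos hd
        omega
    obtain ⟨hndG, hmemG⟩ := genDivsB_spec F [1] 1 one_pos (List.nodup_singleton 1) hbase
      hFall hFpair
    rw [hfoldF] at hmemG
    have hSperm : (PySem.List.sorted (genDivsB F [1]) (fun v => v) false).Perm (genDivsB F [1]) :=
      PySem.List.sorted_perm _ _ _
    have hSnd := hSperm.nodup_iff.2 hndG
    have hSlt : (PySem.List.sorted (genDivsB F [1]) (fun v => v) false).Pairwise (· < ·) :=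
      ((PySem.List.sorted_pairwise (genDivsB F [1]) (fun v => v)).and hSnd).imp
        (fun hab => lt_of_le_of_ne hab.1 hab.2)
    refine eq_of_pairwise_lt_of_mem_iff _ _ (pairwise_LA x) (hSlt.filter _) ?_
    intro v
    rw [mem_LA_iff, List.mem_filter, hSperm.mem_iff, hmemG v]
    constructor
    · rintro ⟨hdvd, h1, hvx⟩
      refine ⟨⟨hdvd, by omega⟩, ?_⟩
      simp only [bne_iff_ne, Bool.and_eq_true]
      constructor
      · omega
      · omega
    · rintro ⟨⟨hdvd, hv0⟩, hg⟩
      simp only [bne_iff_ne, Bool.and_eq_true] at hg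
      have hle : v ≤ x := Int.le_of_dvd (by omega) hdvd
      refine ⟨hdvd, by omega, ?_⟩
      rcases eq_or_lt_of_le hle with rfl | h
      · exact absurd rfl hg.2
      · exact h
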